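-- pv_equiv track=rewrite | github.com/career-prep/ucp-namer-latam-2026 | homework3/sam_strugger_3/q5_FirstKBinaryNumbers.py | binaryNumbers
-- ===== SOURCE A (Python) =====
-- def binaryNumbers(k):
--     res = []
--
--     def intToBinary(num):
--         if num == 0:
--             return "0"
--         result = []
--         q = num
--         while q > 0:
--             result.append(str(q%2))
--             q = q // 2
--         return "".join(result[::-1])
--
--     for i in range(k):
--         bin = intToBinary(i)
--         res.append(bin)
--
--     return res
-- ===== SOURCE B (Python) =====
-- def binaryNumbers(k):
--     res = []
--     if k > 0:
--         res.append("0")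
--     if k > 1:
--         res.append("1")
--     for n in range(2, k):
--         res.append(res[n // 2] + ("1" if n % 2 == 1 else "0"))
--     return res
-- ===== Notes on version B (the rewrite author's own statement) =====
-- stated objective: faster
-- what changed: Replaces the per-number digit-extraction loop (divide by 2 until 0, reverse, join) with a dynamic program that builds each binary string in O(1) from the already-computed string of n//2 plus one digit.
import Mathlib
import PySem

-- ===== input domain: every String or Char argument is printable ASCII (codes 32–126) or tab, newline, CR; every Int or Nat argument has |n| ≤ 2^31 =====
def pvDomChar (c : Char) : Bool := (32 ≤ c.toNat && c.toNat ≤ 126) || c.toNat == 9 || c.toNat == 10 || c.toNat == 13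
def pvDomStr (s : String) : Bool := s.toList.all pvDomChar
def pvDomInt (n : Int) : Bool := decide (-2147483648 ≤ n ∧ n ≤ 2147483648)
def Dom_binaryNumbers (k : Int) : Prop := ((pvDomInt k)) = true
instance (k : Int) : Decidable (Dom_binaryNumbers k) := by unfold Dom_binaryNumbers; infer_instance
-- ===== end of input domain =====

-- B replaces A's per-number divide-by-2 digit loop with a dynamic program that reuses
-- the string already built for n // 2 (objective: faster).

-- ===== PORT A =====
-- inner while loop: while q > 0: result.append(str(q % 2)); q = q // 2
def pvBinLoop (q : Int) (result : List String) : List String :=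
  if _h : 0 < q then
    pvBinLoop (PySem.Int.floordiv q 2) (result ++ [PySem.Int.toStr (PySem.Int.mod q 2)])
  else result
termination_by q.toNat
decreasing_by
  rw [PySem.Int.floordiv_eq_ediv_of_pos (by omega : (0:Int) < 2)]
  omega

def intToBinary (num : Int) : String :=
  if num == 0 then "0"
  else PySem.Str.join "" ((pvBinLoop num []).reverse)
  -- result[::-1] is List.reverse (PySem.List.slice?_none_none_neg_one)

def binaryNumbers (k : Int) : List String :=
  (PySem.List.pyRange 0 k 1).foldl (fun res i => res ++ [intToBinary i]) []

-- ===== PORT B =====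
def binaryNumbers_alt (k : Int) : List String :=
  let res0 := if 0 < k then ["0"] else []
  let res1 := if 1 < k then res0 ++ ["1"] else res0
  (PySem.List.pyRange 2 k 1).foldl
    (fun res n =>
      res ++ [PySem.List.pyGetD res (PySem.Int.floordiv n 2) "" ++
              (if PySem.Int.mod n 2 == 1 then "1" else "0")])
    res1
  -- res[n // 2] is always in range (0 ≤ n // 2 < len res), so pyGetD's default is never used

-- ===== PRECONDITION & SPEC =====
def Spec_binaryNumbers (k : Int) (out : List String) : Prop := out = binaryNumbers_alt k
instance (k : Int) (out : List String) : Decidable (Spec_binaryNumbers k out) := by unfold Spec_binaryNumbers; infer_instance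

-- ===== CLAIM (what is proved, stated in full; the proofs are below) =====
def Claim_equal_binaryNumbers : Prop := ∀ (k : Int), Dom_binaryNumbers k → Spec_binaryNumbers k (binaryNumbers k)

-- ===== LEMMAS AND PROOFS =====

-- the common value of both programs: the binary string of n, via B's recurrence
def pvBin (n : Nat) : String :=
  if n = 0 then "0"
  else if n = 1 then "1"
  else pvBin (n / 2) ++ (if n % 2 == 1 then "1" else "0")
termination_by n
decreasing_by omega

theorem pvBin_zero : pvBin 0 = "0" := by rw [pvBin]; simp
theorem pvBin_one : pvBin 1 = "1" := by rw [pvBin]; simp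

theorem pvBinLoop_step (q : Int) (h : 0 < q) (acc : List String) :
    pvBinLoop q acc
      = pvBinLoop (PySem.Int.floordiv q 2) (acc ++ [PySem.Int.toStr (PySem.Int.mod q 2)]) := by
  rw [pvBinLoop, dif_pos h]

theorem pvBinLoop_stop (q : Int) (h : ¬ 0 < q) (acc : List String) :
    pvBinLoop q acc = acc := by
  rw [pvBinLoop, dif_neg h]

theorem pvBinLoop_acc (n : Nat) : ∀ (q : Int), q.toNat = n → ∀ (acc : List String),
    pvBinLoop q acc = acc ++ pvBinLoop q [] := by
  induction n using Nat.strong_induction_on with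
  | _ n ih =>
    intro q hq acc
    by_cases h : 0 < q
    · have hd : PySem.Int.floordiv q 2 = q / 2 :=
        PySem.Int.floordiv_eq_ediv_of_pos (by omega)
      rw [pvBinLoop_step q h acc, pvBinLoop_step q h [],
          ih (PySem.Int.floordiv q 2).toNat (by omega) _ rfl (acc ++ _),
          ih (PySem.Int.floordiv q 2).toNat (by omega) _ rfl ([] ++ _)]
      simp
    · simp [pvBinLoop_stop q h]

theorem pvJoin_nil_eq_flatten {α : Type} (ps : List (List α)) :
    ([] : List α).intercalate ps = ps.flatten := by
  induction ps with
  | nil => rfl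
  | cons a ps ih =>
    cases ps with
    | nil => simp [List.intercalate]
    | cons b ps => simp_all [List.intercalate, List.intersperse]

theorem pvJoin_append (xs : List String) (y : String) :
    PySem.Str.join "" (xs ++ [y]) = PySem.Str.join "" xs ++ y := by
  simp only [PySem.Str.join, PySem.Chars.join, String.toList_empty, List.map_append,
    List.map_cons, List.map_nil, pvJoin_nil_eq_flatten, List.flatten_append]
  simp [String.ofList_append]

theorem intToBinary_eq_pvBin (n : Nat) : ∀ (q : Int), 0 ≤ q → q.toNat = n →
    intToBinary q = pvBin q.toNat := by
  induction n using Nat.strong_induction_on with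
  | _ n ih =>
    intro q hq0 hqn
    by_cases h0 : q = 0
    · subst h0
      rw [intToBinary, if_pos (by decide), show (0:Int).toNat = 0 from rfl, pvBin]
      simp
    · have hpos : 0 < q := by omega
      have hd : PySem.Int.floordiv q 2 = q / 2 :=
        PySem.Int.floordiv_eq_ediv_of_pos (by omega)
      have hmm : PySem.Int.mod q 2 = q % 2 := PySem.Int.mod_eq_emod_of_pos (by omega)
      rw [intToBinary, if_neg (by simp [h0]), pvBinLoop_step q hpos [],
          pvBinLoop_acc (PySem.Int.floordiv q 2).toNat _ rfl _]
      simp only [List.nil_append, List.reverse_append, List.reverse_cons, List.reverse_nil]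
      rw [pvJoin_append]
      by_cases h1 : q = 1
      · subst h1
        rw [hd, hmm]
        rw [pvBinLoop_stop _ (by norm_num), show ((1:Int)).toNat = 1 from rfl, pvBin]
        simp [PySem.Str.join, PySem.Chars.join]
        decide
      · have h2 : 2 ≤ q := by omega
        have hi : PySem.Str.join "" ((pvBinLoop (PySem.Int.floordiv q 2) []).reverse)
            = intToBinary (PySem.Int.floordiv q 2) := by
          rw [intToBinary, if_neg (by simp only [beq_iff_eq]; omega)]
        rw [hi, ih (PySem.Int.floordiv q 2).toNat (by omega) _ (by omega) rfl]
        conv_rhs => rw [pvBin]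
        rw [if_neg (by omega), if_neg (by omega), hd, hmm]
        have hdn : ((q : Int) / 2).toNat = q.toNat / 2 := by omega
        rcases (by omega : q % 2 = 0 ∨ q % 2 = 1) with hp | hp
        · have : q.toNat % 2 = 0 := by omega
          rw [hdn, hp, this]
          rfl
        · have : q.toNat % 2 = 1 := by omega
          rw [hdn, hp, this]
          rfl

theorem pvA_eq_map (k : Int) : binaryNumbers k = (List.range k.toNat).map pvBin := by
  unfold binaryNumbers
  rw [PySem.List.foldl_append_singleton_eq_map, PySem.List.pyRange_one]
  simp only [List.nil_append, List.map_map, Int.sub_zero]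
  apply List.map_congr_left
  intro j hj
  simp only [Function.comp_apply, Int.zero_add]
  rw [intToBinary_eq_pvBin j (j : Int) (by omega) (by omega)]
  simp

theorem pvB_loop (m : Nat) (hm : 2 ≤ m) :
    (PySem.List.pyRange 2 (m : Int) 1).foldl
      (fun res n =>
        res ++ [PySem.List.pyGetD res (PySem.Int.floordiv n 2) "" ++
                (if PySem.Int.mod n 2 == 1 then "1" else "0")])
      ["0", "1"] = (List.range m).map pvBin := by
  induction m with
  | zero => omega
  | succ m ih =>
    rcases Nat.lt_or_ge m 2 with h | h
    · have hm1 : m = 1 := by omega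
      subst hm1
      rw [show ((2:Nat) : Int) = 2 from rfl, PySem.List.pyRange_one_eq_nil (by omega)]
      simp only [List.foldl_nil]
      rw [show List.range 2 = [0, 1] from rfl]
      simp [pvBin_zero, pvBin_one]
    · have hc : ((m + 1 : Nat) : Int) = (m : Int) + 1 := by push_cast; ring
      rw [hc, PySem.List.pyRange_one_succ_right (by omega), List.foldl_append, ih h]
      simp only [List.foldl_cons, List.foldl_nil]
      rw [(by exact_mod_cast PySem.Int.floordiv_natCast m 2 :
            PySem.Int.floordiv (m : Int) 2 = ((m / 2 : Nat) : Int)),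
          (by exact_mod_cast PySem.Int.mod_natCast m 2 :
            PySem.Int.mod (m : Int) 2 = ((m % 2 : Nat) : Int)),
          PySem.List.pyGetD_natCast, PySem.List.getD_map_range pvBin m (m / 2) "" (by omega),
          List.range_succ, List.map_append, List.map_cons, List.map_nil]
      congr 1
      congr 1
      rcases (by omega : m % 2 = 0 ∨ m % 2 = 1) with hp | hp
      · rw [hp]
        norm_num
        conv_rhs => rw [pvBin]
        rw [if_neg (by omega), if_neg (by omega), hp]
        norm_num
      · rw [hp]
        norm_num
        conv_rhs => rw [pvBin]
        rw [if_neg (by omega), if_neg (by omega), hp]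
        norm_num

theorem pvB_eq_map (k : Int) : binaryNumbers_alt k = (List.range k.toNat).map pvBin := by
  unfold binaryNumbers_alt
  dsimp only
  by_cases hk0 : k ≤ 0
  · rw [if_neg (by omega), if_neg (by omega), PySem.List.pyRange_one_eq_nil (by omega)]
    simp [show k.toNat = 0 by omega]
  · obtain ⟨m, rfl⟩ : ∃ m : Nat, k = (m : Int) := ⟨k.toNat, by omega⟩
    by_cases hk1 : m = 1
    · subst hk1
      norm_num
      exact pvBin_zero.symm
    · have h2 : 2 ≤ m := by omega
      rw [if_pos (by omega : (0:Int) < m), if_pos (by omega : (1:Int) < m)]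
      simp only [List.singleton_append, Int.toNat_natCast]
      exact pvB_loop m h2

-- ===== VERDICT (by name: the statement is the Claim_ definition above) =====
theorem binaryNumbers_spec : Claim_equal_binaryNumbers := by
  intro k _
  unfold Spec_binaryNumbers
  rw [pvA_eq_map, pvB_eq_map]
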